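-- pv_equiv track=rewrite | github.com/ayukyo/alltoolkit | Python/anagram_utils/mod.py | find_anagram_subset
-- ===== SOURCE A (Python) =====
-- from collections import Counter, defaultdict
-- from itertools import permutations
--
-- def normalize_text(text: str) -> str:
--     """
--     规范化文本：移除空格、标点，转换为小写
--
--     Args:
--         text: 输入文本
--
--     Returns:
--         规范化后的文本
--
--     Examples:
--         >>> normalize_text("Listen!")
--         'listen'
--         >>> normalize_text("A gentleman")
--         'agentleman'
--     """
--     return ''.join(c.lower() for c in text if c.isalnum())
--
-- def get_char_count(text: str) -> Counter:
--     """
--     获取文本中每个字符的出现次数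
--
--     Args:
--         text: 输入文本
--
--     Returns:
--         字符计数的 Counter 对象
--
--     Examples:
--         >>> get_char_count("hello")
--         Counter({'l': 2, 'h': 1, 'e': 1, 'o': 1})
--     """
--     return Counter(c.lower() for c in text if c.isalnum())
--
-- def find_anagram_subset(letters: str, target_length: int) -> int:
--     """
--     计算从给定字母中能组成特定长度变位词的数量
--
--     Args:
--         letters: 可用字母池
--         target_length: 目标长度
--
--     Returns:
--         可能的排列数量
--
--     Examples:
--         >>> find_anagram_subset("abc", 2)  # P(3,2) = 6
--         6
--         >>> find_anagram_subset("aab", 2)  # aa, ab, ba = 3 unique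
--         3
--     """
--     letters = normalize_text(letters)
--     char_count = get_char_count(letters)
--     n = len(letters)
--
--     if target_length > n:
--         return 0
--
--     # 对于有重复字符的情况，精确计算比较复杂
--     # 这里使用生成排列并去重的方式
--     perms = set()
--     for perm in permutations(letters, target_length):
--         perms.add(''.join(perm))
--
--     return len(perms)
-- ===== SOURCE B (Python) =====
-- from collections import Counter
--
-- def find_anagram_subset(letters: str, target_length: int) -> int:
--     # DP over distinct characters (multiset k-permutation count via binomial
--     # convolution) instead of generating and deduplicating permutations.
--     pool = [c.lower() for c in letters if c.isalnum()]
--     n = len(pool)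
--     if target_length < 0 or target_length > n:
--         return 0
--     k = target_length
--     dp = [1] + [0] * k
--     for cnt in Counter(pool).values():
--         ndp = [0] * (k + 1)
--         for j in range(k + 1):
--             s = 0
--             f = 1  # running binomial C(j, t)
--             for t in range(min(cnt, j) + 1):
--                 s += f * dp[j - t]
--                 f = f * (j - t) // (t + 1)
--             ndp[j] = s
--         dp = ndp
--     return dp[k]
-- ===== Notes on version B (the rewrite author's own statement) =====
-- stated objective: alternative
-- what changed: A enumerates all k-permutations of the letter pool and deduplicates them in a set; B never enumerates: it runs a dynamic program over the distinct characters (binomial convolution, the EGF coefficient for multiset k-permutations) and returns the count directly.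
import Mathlib
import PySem

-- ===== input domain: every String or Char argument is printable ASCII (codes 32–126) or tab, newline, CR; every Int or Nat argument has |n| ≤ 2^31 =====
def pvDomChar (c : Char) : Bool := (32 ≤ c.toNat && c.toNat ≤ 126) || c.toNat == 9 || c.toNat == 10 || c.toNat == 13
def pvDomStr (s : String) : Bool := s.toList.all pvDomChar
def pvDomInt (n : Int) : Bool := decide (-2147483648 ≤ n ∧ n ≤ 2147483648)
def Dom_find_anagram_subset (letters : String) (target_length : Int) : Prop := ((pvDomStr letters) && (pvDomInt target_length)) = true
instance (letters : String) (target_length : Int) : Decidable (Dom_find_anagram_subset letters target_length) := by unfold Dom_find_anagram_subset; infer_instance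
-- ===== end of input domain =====

-- B replaces A's generate-all-permutations-and-deduplicate search by a DP over the distinct
-- characters (binomial convolution = multiset k-permutation count); objective: alternative.

-- ===== PORT A =====
-- normalize_text: ''.join(c.lower() for c in text if c.isalnum())
def pvNormalizeA (text : List Char) : List Char :=
  (text.filter PySem.Chars.isalnum).map PySem.Chars.lowerChar

def find_anagram_subset (letters : String) (target_length : Int) : Int :=
  let lets := pvNormalizeA letters.toList
  -- get_char_count(letters): Counter(c.lower() for c in letters if c.isalnum()) — computed, never used
  let _char_count := PySem.Dict.counter (pvNormalizeA lets)
  let n : Int := lets.length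
  if target_length > n then 0
  else
    -- perms = set(); for perm in permutations(letters, target_length): perms.add(''.join(perm))
    let perms : PySem.Set String :=
      PySem.Set.ofList ((PySem.List.permutations lets target_length.toNat).map String.ofList)
    PySem.Set.len perms

-- ===== PORT B =====
-- inner t-loop of Source B: the (s, f) accumulator pair (f is the running binomial C(j, t))
def pvInnerSum (dp : List Int) (cnt : Int) (j : Nat) : Int :=
  ((List.range ((min cnt (j : Int)).toNat + 1)).foldl
    (fun sf t => (sf.1 + sf.2 * dp.getD (j - t) 0,
                  PySem.Int.floordiv (sf.2 * ((j : Int) - (t : Int))) ((t : Int) + 1)))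
    ((0 : Int), (1 : Int))).1

-- j-loop of Source B building ndp
def pvStep (k : Nat) (dp : List Int) (cnt : Int) : List Int :=
  (List.range (k + 1)).map (fun j => pvInnerSum dp cnt j)

def find_anagram_subset_alt (letters : String) (target_length : Int) : Int :=
  let pool := (letters.toList.filter PySem.Chars.isalnum).map PySem.Chars.lowerChar
  let n : Int := pool.length
  if target_length < 0 ∨ target_length > n then 0
  else
    let k := target_length.toNat
    let dp := ((PySem.Dict.counter pool).values).foldl (pvStep k) (1 :: List.replicate k 0)
    dp.getD k 0

-- ===== PRECONDITION & SPEC =====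
-- Pre_ excludes exactly target_length < 0, where A raises ValueError (itertools.permutations).
def Pre_find_anagram_subset (letters : String) (target_length : Int) : Prop :=
  0 ≤ target_length
instance (letters : String) (target_length : Int) : Decidable (Pre_find_anagram_subset letters target_length) := by unfold Pre_find_anagram_subset; infer_instance
def pvWitness_find_anagram_subset : String × Int := ("aab", 2)

def Spec_find_anagram_subset (letters : String) (target_length : Int) (out : Int) : Prop := out = find_anagram_subset_alt letters target_length
instance (letters : String) (target_length : Int) (out : Int) : Decidable (Spec_find_anagram_subset letters target_length out) := by unfold Spec_find_anagram_subset; infer_instance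

-- ===== CLAIM (what is proved, stated in full; the proofs are below) =====
def Claim_equal_find_anagram_subset : Prop := ∀ (letters : String) (target_length : Int), Dom_find_anagram_subset letters target_length → Pre_find_anagram_subset letters target_length → Spec_find_anagram_subset letters target_length (find_anagram_subset letters target_length)

-- ===== LEMMAS AND PROOFS =====
-- The common mathematical object: pvW m k is the finite set of length-k words whose letter
-- multiset is contained in m; pvF is its cardinality. A counts it by enumerating permutations
-- and deduplicating (pvA_count); B computes it by the binomial-convolution recurrence
-- (pvF_add_rep, pvB_dp).
def pvW (m : Multiset Char) : Nat → Finset (List Char)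
  | 0 => {[]}
  | k+1 => m.toFinset.biUnion (fun c => (pvW (m.erase c) k).image (c :: ·))
def pvF (m : Multiset Char) (k : Nat) : Nat := (pvW m k).card

theorem pvmem_W : ∀ (k : Nat) (m : Multiset Char) (l : List Char),
    l ∈ pvW m k ↔ l.length = k ∧ (l : Multiset Char) ≤ m := by
  intro k
  induction k with
  | zero =>
    intro m l
    simp [pvW, List.length_eq_zero_iff]
    rintro rfl; simp
  | succ k ih =>
    intro m l
    simp only [pvW, Finset.mem_biUnion, Finset.mem_image, Multiset.mem_toFinset]
    constructor
    · rintro ⟨c, hc, t, ht, rfl⟩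
      obtain ⟨htl, htm⟩ := (ih _ _).mp ht
      refine ⟨by simp [htl], ?_⟩
      calc (↑(c :: t) : Multiset Char) = c ::ₘ (t : Multiset Char) := by simp
        _ ≤ c ::ₘ m.erase c := Multiset.cons_le_cons _ htm
        _ = m := Multiset.cons_erase hc
    · rintro ⟨hl, hm⟩
      cases l with
      | nil => simp at hl
      | cons c t =>
        have hc : c ∈ m := Multiset.mem_of_le hm (by simp)
        refine ⟨c, hc, t, (ih _ _).mpr ⟨by simpa using hl, ?_⟩, rfl⟩
        have := Multiset.erase_le_erase c hm
        simpa using this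
theorem pvF_succ (m : Multiset Char) (k : Nat) :
    pvF m (k+1) = ∑ c ∈ m.toFinset, pvF (m.erase c) k := by
  unfold pvF
  show (pvW m (k+1)).card = _
  rw [pvW, Finset.card_biUnion]
  · exact Finset.sum_congr rfl (fun c _ => Finset.card_image_of_injective _ List.cons_injective)
  · intro c _ d _ hcd
    simp only [Finset.disjoint_left, Finset.mem_image]
    rintro l ⟨t, _, rfl⟩ ⟨t', _, h⟩
    exact hcd (List.cons.injEq .. ▸ h).1.symm
theorem pvmem_permutations : ∀ (r : Nat) (xs : List Char) (l : List Char),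
    l ∈ PySem.List.permutations xs r ↔ l.length = r ∧ (l : Multiset Char) ≤ (xs : Multiset Char) := by
  intro r
  induction r with
  | zero =>
    intro xs l
    constructor
    · rintro h
      simp only [PySem.List.permutations] at h
      simp only [List.mem_singleton] at h
      subst h; simp
    · rintro ⟨hl, _⟩
      rw [List.length_eq_zero_iff] at hl
      subst hl
      simp [PySem.List.permutations]
  | succ r ih =>
    intro xs l
    rw [PySem.List.permutations]
    simp only [List.mem_flatMap, List.mem_range]
    constructor
    · rintro ⟨i, hi, hmem⟩
      rw [List.getElem?_eq_getElem hi] at hmem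
      simp only [List.mem_map] at hmem
      obtain ⟨p, hp, rfl⟩ := hmem
      obtain ⟨hpl, hpm⟩ := (ih _ _).mp hp
      have hperm : xs.Perm (xs[i] :: xs.eraseIdx i) :=
        (List.getElem_cons_eraseIdx_perm hi).symm
      have hcoe : (xs : Multiset Char) = xs[i] ::ₘ (xs.eraseIdx i : Multiset Char) :=
        Multiset.coe_eq_coe.mpr hperm
      refine ⟨by simp [hpl], ?_⟩
      rw [hcoe]
      calc (↑(xs[i] :: p) : Multiset Char) = xs[i] ::ₘ (p : Multiset Char) := by simp
        _ ≤ xs[i] ::ₘ (xs.eraseIdx i : Multiset Char) := Multiset.cons_le_cons _ hpm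
    · rintro ⟨hl, hm⟩
      cases l with
      | nil => simp at hl
      | cons c p =>
        have hc : c ∈ xs := by
          have : c ∈ (xs : Multiset Char) := Multiset.mem_of_le hm (by simp)
          simpa using this
        have hi : xs.idxOf c < xs.length := List.idxOf_lt_length_of_mem hc
        refine ⟨xs.idxOf c, hi, ?_⟩
        rw [List.getElem?_eq_getElem hi]
        simp only [List.mem_map]
        have hget : xs[xs.idxOf c] = c := List.getElem_idxOf hi
        have hperm : xs.Perm (xs[xs.idxOf c] :: xs.eraseIdx (xs.idxOf c)) :=
          (List.getElem_cons_eraseIdx_perm hi).symm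
        have hcoe : (xs : Multiset Char) = c ::ₘ (xs.eraseIdx (xs.idxOf c) : Multiset Char) := by
          rw [Multiset.coe_eq_coe.mpr hperm, hget]; simp
        refine ⟨p, (ih _ _).mpr ⟨by simpa using hl, ?_⟩, by rw [hget]⟩
        have h2 := Multiset.erase_le_erase c hm
        rw [hcoe] at h2
        simpa using h2
theorem pvA_count (xs : List Char) (r : Nat) :
    (PySem.Set.ofList ((PySem.List.permutations xs r).map String.ofList)).length
      = pvF (xs : Multiset Char) r := by
  set L := PySem.List.permutations xs r with hL
  set LS := L.map String.ofList with hLS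
  have hinj : Function.Injective String.ofList := by
    intro a b h
    have := congrArg String.toList h
    simpa using this
  have h1 : (PySem.Set.ofList LS).toFinset = LS.toFinset := by
    apply Finset.ext
    intro s
    simp [PySem.Set.mem_ofList]
  have h2 : (PySem.Set.ofList LS).length = (PySem.Set.ofList LS).toFinset.card :=
    (List.toFinset_card_of_nodup (PySem.Set.nodup_ofList _)).symm
  have h3 : LS.toFinset = L.toFinset.image String.ofList := by
    apply Finset.ext
    intro s
    simp [hLS]
  have h4 : L.toFinset = pvW (xs : Multiset Char) r := by
    apply Finset.ext
    intro l
    simp only [List.mem_toFinset, hL, pvmem_permutations, pvmem_W]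
  rw [h2, h1, h3, Finset.card_image_of_injective _ hinj, h4, pvF]
theorem pv_choose_step (j t : Nat) (h : t ≤ j) :
    PySem.Int.floordiv ((j.choose t : Int) * ((j : Int) - (t : Int))) ((t : Int) + 1)
      = (j.choose (t+1) : Int) := by
  have h1 : ((j : Int) - (t : Int)) = ((j - t : Nat) : Int) := by
    push_cast [h]; ring
  have h2 : ((j.choose t : Int) * ((j - t : Nat) : Int)) = ((j.choose t * (j - t) : Nat) : Int) := by
    push_cast; ring
  rw [h1, h2, ← Nat.choose_succ_right_eq]
  have h3 : ((t : Int) + 1) = ((t + 1 : Nat) : Int) := by push_cast; ring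
  rw [h3, PySem.Int.floordiv_natCast, Nat.mul_div_cancel _ (Nat.succ_pos t)]

theorem pv_fold_binom (g : Nat → Int) (j : Nat) : ∀ (T : Nat), T ≤ j + 1 →
    (List.range T).foldl
      (fun sf t => (sf.1 + sf.2 * g t,
                    PySem.Int.floordiv (sf.2 * ((j : Int) - (t : Int))) ((t : Int) + 1)))
      ((0 : Int), (1 : Int))
    = (∑ t ∈ Finset.range T, (j.choose t : Int) * g t, (j.choose T : Int)) := by
  intro T
  induction T with
  | zero => intro _; simp
  | succ T ih =>
    intro hT
    have hTj : T ≤ j := by omega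
    rw [List.range_succ, List.foldl_append, ih (by omega), List.foldl_cons, List.foldl_nil]
    simp only
    rw [Finset.sum_range_succ, pv_choose_step j T hTj]

theorem pvInnerSum_eq (dp : List Int) (cntN : Nat) (j : Nat) :
    pvInnerSum dp (cntN : Int) j
      = ∑ t ∈ Finset.range (min cntN j + 1), (j.choose t : Int) * dp.getD (j - t) 0 := by
  unfold pvInnerSum
  have hmin : (min (cntN : Int) (j : Int)).toNat = min cntN j := by omega
  rw [hmin, pv_fold_binom (fun t => dp.getD (j - t) 0) j (min cntN j + 1) (by omega)]
theorem pv_sum_split (cnt j : Nat) (P : Nat → Nat) :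
    ∑ t ∈ Finset.range (min (cnt+1) (j+1) + 1), (j+1).choose t * P (j+1-t)
      = (∑ t ∈ Finset.range (min cnt j + 1), j.choose t * P (j-t))
        + ∑ t ∈ Finset.range (min (cnt+1) j + 1), j.choose t * P (j+1-t) := by
  have hmin : min (cnt+1) (j+1) = min cnt j + 1 := by omega
  rw [hmin]
  rw [Finset.sum_range_succ' (fun t => (j+1).choose t * P (j+1-t)) (min cnt j + 1)]
  rw [Finset.sum_range_succ' (fun t => j.choose t * P (j+1-t)) (min (cnt+1) j)]
  simp only [Nat.choose_succ_succ, Nat.succ_sub_succ, add_mul, Finset.sum_add_distrib,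
    Nat.choose_zero_right, one_mul, Nat.sub_zero]
  have key : ∑ t ∈ Finset.range (min cnt j + 1), j.choose (t+1) * P (j-t)
      = ∑ t ∈ Finset.range (min (cnt+1) j), j.choose (t+1) * P (j-t) := by
    by_cases hcj : j ≤ cnt
    · rw [show min cnt j = j by omega, show min (cnt+1) j = j by omega,
        Finset.sum_range_succ]
      simp [Nat.choose_succ_self]
    · rw [show min cnt j = cnt by omega, show min (cnt+1) j = cnt + 1 by omega]
  rw [key]; ring
theorem pvF_add_rep : ∀ (j : Nat) (m : Multiset Char) (c : Char) (cnt : Nat), c ∉ m →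
    pvF (m + Multiset.replicate cnt c) j
      = ∑ t ∈ Finset.range (min cnt j + 1), j.choose t * pvF m (j - t) := by
  intro j
  induction j with
  | zero =>
    intro m c cnt _
    simp [pvF, pvW]
  | succ j ih =>
    intro m c cnt hc
    cases cnt with
    | zero => simp
    | succ cnt =>
      have hc' : c ∉ m.toFinset := by simpa using hc
      have htf : (m + Multiset.replicate (cnt+1) c).toFinset = insert c m.toFinset := by
        rw [Multiset.toFinset_add, Multiset.toFinset_replicate]
        simp only [Nat.add_eq_zero_iff, one_ne_zero, and_false, if_false]
        rw [Finset.union_singleton]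
      rw [pvF_succ, htf, Finset.sum_insert hc']
      have herasec : (m + Multiset.replicate (cnt+1) c).erase c = m + Multiset.replicate cnt c := by
        rw [Multiset.replicate_succ, Multiset.add_cons, Multiset.erase_cons_head]
      have herased : ∀ d ∈ m.toFinset,
          (m + Multiset.replicate (cnt+1) c).erase d = m.erase d + Multiset.replicate (cnt+1) c := by
        intro d hd
        exact Multiset.erase_add_left_pos _ (Multiset.mem_toFinset.mp hd)
      rw [herasec, ih m c cnt hc]
      have hsum : ∑ d ∈ m.toFinset, pvF ((m + Multiset.replicate (cnt+1) c).erase d) j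
          = ∑ t ∈ Finset.range (min (cnt+1) j + 1), j.choose t * pvF m (j + 1 - t) := by
        rw [Finset.sum_congr rfl (fun d hd => by
          rw [herased d hd, ih (m.erase d) c (cnt+1)
            (fun h => hc (Multiset.mem_of_le (Multiset.erase_le d m) h))])]
        rw [Finset.sum_comm]
        refine Finset.sum_congr rfl (fun t ht => ?_)
        have htj : t ≤ j := by
          simp only [Finset.mem_range] at ht; omega
        rw [← Finset.mul_sum, ← pvF_succ, show j - t + 1 = j + 1 - t from by omega]
      rw [hsum, pv_sum_split]
theorem pvStep_eq (k : Nat) (m : Multiset Char) (c : Char) (cntN : Nat) (hc : c ∉ m) :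
    pvStep k ((List.range (k+1)).map (fun j => (pvF m j : Int))) (cntN : Int)
      = (List.range (k+1)).map (fun j => (pvF (m + Multiset.replicate cntN c) j : Int)) := by
  unfold pvStep
  refine List.map_congr_left (fun j hj => ?_)
  have hjk : j < k + 1 := List.mem_range.mp hj
  rw [pvInnerSum_eq, pvF_add_rep j m c cntN hc]
  push_cast
  refine Finset.sum_congr rfl (fun t ht => ?_)
  have htj : t ≤ j := by simp only [Finset.mem_range] at ht; omega
  rw [PySem.List.getD_map_range _ _ _ _ (by omega)]

def pvRep (pool ds : List Char) : Multiset Char :=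
  (ds.map (fun c => Multiset.replicate (pool.count c) c)).sum

theorem pv_count_pvRep (pool : List Char) : ∀ (ds : List Char), ds.Nodup → ∀ (x : Char),
    Multiset.count x (pvRep pool ds) = if x ∈ ds then pool.count x else 0 := by
  intro ds
  induction ds with
  | nil => intro _ x; simp [pvRep]
  | cons c ds ih =>
    intro hnd x
    have hnd' := hnd.of_cons
    have hcd : c ∉ ds := (List.nodup_cons.mp hnd).1
    simp only [pvRep, List.map_cons, List.sum_cons, Multiset.count_add,
      Multiset.count_replicate]
    rw [show ((ds.map (fun c => Multiset.replicate (pool.count c) c)).sum) = pvRep pool ds from rfl,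
      ih hnd' x]
    by_cases hxc : x = c
    · subst hxc
      simp [hcd]
    · simp [hxc, Ne.symm hxc, List.mem_cons]
theorem pvRep_dedup (pool : List Char) :
    pvRep pool (PySem.List.dedup pool) = (pool : Multiset Char) := by
  apply Multiset.ext.mpr
  intro x
  rw [pv_count_pvRep pool _ (PySem.List.nodup_dedup pool) x, Multiset.coe_count]
  by_cases hx : x ∈ pool
  · rw [if_pos ((PySem.List.mem_dedup pool x).mpr hx)]
  · rw [if_neg (fun h => hx ((PySem.List.mem_dedup pool x).mp h)),
      List.count_eq_zero_of_not_mem hx]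

theorem pv_fold_inv (pool : List Char) (k : Nat) : ∀ (ds : List Char) (m : Multiset Char),
    ds.Nodup → (∀ c ∈ ds, c ∉ m) →
    (ds.map (fun c => (pool.count c : Int))).foldl (pvStep k)
        ((List.range (k+1)).map (fun j => (pvF m j : Int)))
      = (List.range (k+1)).map (fun j => (pvF (m + pvRep pool ds) j : Int)) := by
  intro ds
  induction ds with
  | nil => intro m _ _; simp [pvRep]
  | cons c ds ih =>
    intro m hnd hmem
    simp only [List.map_cons, List.foldl_cons]
    rw [pvStep_eq k m c (pool.count c) (hmem c (by simp))]
    rw [ih (m + Multiset.replicate (pool.count c) c) hnd.of_cons ?_]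
    · congr 1
      funext j
      congr 1
      show pvF (m + Multiset.replicate (List.count c pool) c + pvRep pool ds) j
        = pvF (m + pvRep pool (c :: ds)) j
      rw [show pvRep pool (c :: ds) = Multiset.replicate (List.count c pool) c + pvRep pool ds
        from by simp [pvRep], ← add_assoc]
    · intro c' hc'
      simp only [Multiset.mem_add]
      rintro (h | h)
      · exact hmem c' (by simp [hc']) h
      · have := Multiset.eq_of_mem_replicate h
        subst this
        exact (List.nodup_cons.mp hnd).1 hc'

theorem pv_dp0 (k : Nat) :
    (1 :: List.replicate k 0 : List Int)
      = (List.range (k+1)).map (fun j => (pvF (0 : Multiset Char) j : Int)) := by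
  rw [List.range_succ_eq_map, List.map_cons, List.map_map]
  have h1 : ((pvF (0 : Multiset Char) 0 : Nat) : Int) = 1 := by simp [pvF, pvW]
  have h2 : List.map ((fun j => ((pvF (0 : Multiset Char) j : Nat) : Int)) ∘ Nat.succ)
      (List.range k) = List.replicate k 0 := by
    rw [List.eq_replicate_iff]
    refine ⟨by simp, fun b hb => ?_⟩
    simp only [List.mem_map, List.mem_range] at hb
    obtain ⟨j, _, rfl⟩ := hb
    simp [Function.comp, pvF, pvW]
  rw [h1, h2]
theorem pvB_dp (pool : List Char) (k : Nat) :
    ((PySem.Dict.counter pool).values).foldl (pvStep k) (1 :: List.replicate k 0)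
      = (List.range (k+1)).map (fun j => (pvF (pool : Multiset Char) j : Int)) := by
  have hv : (PySem.Dict.counter pool).values
      = (PySem.List.dedup pool).map (fun c => (pool.count c : Int)) := by
    show ((PySem.Dict.counter pool).items).map (·.2) = _
    rw [PySem.Dict.items_counter, List.map_map, PySem.List.dedup_eq_ofList]
    rfl
  rw [hv, pv_dp0 k,
    pv_fold_inv pool k (PySem.List.dedup pool) 0 (PySem.List.nodup_dedup pool) (by simp),
    zero_add, pvRep_dedup]

theorem find_anagram_subset_main (letters : String) (target_length : Int)
    (hpre : 0 ≤ target_length) :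
    find_anagram_subset letters target_length = find_anagram_subset_alt letters target_length := by
  simp only [find_anagram_subset, find_anagram_subset_alt, pvNormalizeA]
  set xs := (letters.toList.filter PySem.Chars.isalnum).map PySem.Chars.lowerChar with hxs
  by_cases hk : ((xs.length : Int)) < target_length
  · rw [if_pos hk, if_pos (Or.inr hk)]
  · rw [if_neg hk, if_neg (by omega)]
    rw [pvB_dp xs target_length.toNat,
      PySem.List.getD_map_range _ _ _ _ (Nat.lt_succ_self _)]
    rw [show PySem.Set.len (PySem.Set.ofList ((PySem.List.permutations xs target_length.toNat).map String.ofList))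
        = ((PySem.Set.ofList ((PySem.List.permutations xs target_length.toNat).map String.ofList)).length : Int) from rfl,
      pvA_count]

-- ===== VERDICT (by name: the statement is the Claim_ definition above) =====
theorem find_anagram_subset_spec : Claim_equal_find_anagram_subset := by
  intro letters target_length _ hpre
  exact find_anagram_subset_main letters target_length hpre
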